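-- pv_equiv track=rewrite | github.com/jcrowe6/my-advent-of-code | 2025/day07/solver01.py | compute_beams
-- ===== SOURCE A (Python) =====
-- def compute_beams(prev_beams, curr_row):
--     new_beams = set()
--     splits = 0
--     for i in range(len(curr_row)):
--         val = curr_row[i]
--         if i in prev_beams:  # beam above this spot
--             if val == ".":  # empty space, it continues
--                 new_beams.add(i)
--             if val == "^":  # splitter, L/R get beams (checked that ^^ does not exist)
--                 new_beams.add(i - 1)
--                 new_beams.add(i + 1)
--                 splits += 1
--     return new_beams, splits
-- ===== SOURCE B (Python) =====
-- def compute_beams(prev_beams, curr_row):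
--     # Stage 1: build a descending stack of the distinct in-range beam positions.
--     # Stage 2: pop them off smallest-first, updating the set/count accumulators.
--     new_beams = set()
--     splits = 0
--     stack = sorted((i for i in set(prev_beams) if 0 <= i < len(curr_row)), reverse=True)
--     while stack:
--         i = stack.pop()
--         c = curr_row[i]
--         if c == ".":
--             new_beams |= {i}
--         elif c == "^":
--             new_beams |= {i - 1, i + 1}
--             splits += 1
--     return new_beams, splits
-- ===== Notes on version B (the rewrite author's own statement) =====
-- stated objective: alternative
-- what changed: Instead of a single loop over every column testing membership in prev_beams, B first builds a reverse-sorted stack of the distinct in-range beam positions and then consumes it by popping smallest-first in a while loop, indexing into curr_row.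
import Mathlib
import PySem

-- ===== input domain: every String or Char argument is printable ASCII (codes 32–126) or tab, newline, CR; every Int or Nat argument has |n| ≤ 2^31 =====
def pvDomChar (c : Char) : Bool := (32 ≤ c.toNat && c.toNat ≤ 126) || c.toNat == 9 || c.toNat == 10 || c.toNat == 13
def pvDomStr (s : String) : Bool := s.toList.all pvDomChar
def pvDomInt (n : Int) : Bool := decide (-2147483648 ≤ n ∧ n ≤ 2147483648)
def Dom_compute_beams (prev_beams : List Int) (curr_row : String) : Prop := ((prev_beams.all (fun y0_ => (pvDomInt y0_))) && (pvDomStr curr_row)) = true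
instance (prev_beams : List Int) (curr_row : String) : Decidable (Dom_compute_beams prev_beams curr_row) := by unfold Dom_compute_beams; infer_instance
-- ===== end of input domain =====

-- B builds a reverse-sorted stack of the distinct in-range beam positions and pops it smallest-first, instead of A's single scan of every column (alternative decomposition, same result).

-- ===== PORT A =====
-- for i in range(len(curr_row)): val = curr_row[i]; if i in prev_beams: …
-- (indexing is exact here: i produced by range(len(curr_row)) is always in range, so pyGetD never hits its default)
def compute_beams (prev_beams : List Int) (curr_row : String) : List Int × Int :=
  (PySem.List.pyRange 0 (PySem.Str.len curr_row) 1).foldl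
    (fun (st : PySem.Set Int × Int) i =>
      let val := PySem.List.pyGetD curr_row.toList i ' '
      if i ∈ prev_beams then
        let st1 := if val = '.' then (PySem.Set.add st.1 i, st.2) else st
        if val = '^' then (PySem.Set.add (PySem.Set.add st1.1 (i - 1)) (i + 1), st1.2 + 1) else st1
      else st)
    (PySem.Set.empty, 0)

-- ===== PORT B =====
-- while stack: i = stack.pop(); c = curr_row[i]; …
-- (indexing is exact here: every popped i satisfies 0 <= i < len(curr_row) by the filter, so pyGetD never hits its default)
def pvLoopAlt (curr_row : String) (stack : List Int) (acc : PySem.Set Int) (splits : Int) : PySem.Set Int × Int :=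
  match h : PySem.List.pop? stack (-1) with
  | none => (acc, splits)
  | some (i, rest) =>
    let c := PySem.List.pyGetD curr_row.toList i ' '
    if c = '.' then pvLoopAlt curr_row rest (PySem.Set.union acc [i]) splits
    else if c = '^' then pvLoopAlt curr_row rest (PySem.Set.union acc [i - 1, i + 1]) (splits + 1)
    else pvLoopAlt curr_row rest acc splits
termination_by stack.length
decreasing_by all_goals (have hl : rest.length + 1 = stack.length := PySem.List.length_of_pop?_eq_some stack h; omega)

-- stack = sorted((i for i in set(prev_beams) if 0 <= i < len(curr_row)), reverse=True)
def compute_beams_alt (prev_beams : List Int) (curr_row : String) : List Int × Int :=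
  pvLoopAlt curr_row
    (PySem.List.sorted
      ((PySem.Set.ofList prev_beams).filter (fun i => decide (0 ≤ i ∧ i < PySem.Str.len curr_row)))
      (fun x => x) true)
    PySem.Set.empty 0

-- ===== PRECONDITION & SPEC =====
def Spec_compute_beams (prev_beams : List Int) (curr_row : String) (out : List Int × Int) : Prop := out = compute_beams_alt prev_beams curr_row
instance (prev_beams : List Int) (curr_row : String) (out : List Int × Int) : Decidable (Spec_compute_beams prev_beams curr_row out) := by unfold Spec_compute_beams; infer_instance

-- ===== CLAIM =====
def Claim_equal_compute_beams : Prop := ∀ (prev_beams : List Int) (curr_row : String), Dom_compute_beams prev_beams curr_row → Spec_compute_beams prev_beams curr_row (compute_beams prev_beams curr_row)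

-- ===== LEMMAS AND PROOFS =====

-- the shared loop core, once both guards (membership / in-range) have been stripped
def pvCore (curr_row : String) (st : PySem.Set Int × Int) (i : Int) : PySem.Set Int × Int :=
  let val := PySem.List.pyGetD curr_row.toList i ' '
  if val = '.' then (PySem.Set.add st.1 i, st.2)
  else if val = '^' then (PySem.Set.add (PySem.Set.add st.1 (i - 1)) (i + 1), st.2 + 1)
  else st

-- A's body (after the membership guard) equals the core: '.' and '^' are distinct characters
theorem pvCoreA (curr_row : String) (st : PySem.Set Int × Int) (i : Int) :
    (let val := PySem.List.pyGetD curr_row.toList i ' '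
     let st1 := if val = '.' then (PySem.Set.add st.1 i, st.2) else st
     if val = '^' then (PySem.Set.add (PySem.Set.add st1.1 (i - 1)) (i + 1), st1.2 + 1) else st1)
    = pvCore curr_row st i := by
  unfold pvCore
  by_cases h1 : PySem.List.pyGetD curr_row.toList i ' ' = '.'
  · simp [h1]
  · by_cases h2 : PySem.List.pyGetD curr_row.toList i ' ' = '^' <;> simp [h1, h2]

-- B's pop loop consumes the stack back-to-front: it is the fold of the core over the reversed stack
theorem pvLoopAlt_eq_foldl (curr_row : String) (stack : List Int) (acc : PySem.Set Int) (splits : Int) :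
    pvLoopAlt curr_row stack acc splits = stack.reverse.foldl (pvCore curr_row) (acc, splits) := by
  induction stack using List.reverseRecOn generalizing acc splits with
  | nil => rw [pvLoopAlt]; cases PySem.List.pyIdx? 0 (-1) <;> rfl
  | append_singleton xs x ih =>
    rw [pvLoopAlt]
    rw [PySem.List.pop?_last]
    by_cases h1 : PySem.List.pyGetD curr_row.toList x ' ' = '.'
    · simp only [h1, List.reverse_append, List.reverse_singleton, List.singleton_append, List.foldl_cons, ih]
      simp [pvCore, PySem.Set.union, h1]
    · by_cases h2 : PySem.List.pyGetD curr_row.toList x ' ' = '^' <;>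
        (simp only [h1, h2, List.reverse_append, List.reverse_singleton, List.singleton_append, List.foldl_cons, ih]; simp [pvCore, PySem.Set.union, h1, h2])

-- the reversed stack is exactly A's filtered range: both enumerate, strictly increasingly,
-- the elements of prev_beams lying in [0, len)
theorem pvListEq (prev_beams : List Int) (n : Int) :
    (PySem.List.sorted
      ((PySem.Set.ofList prev_beams).filter (fun i => decide (0 ≤ i ∧ i < n)))
      (fun x => x) true).reverse
    = (PySem.List.pyRange 0 n 1).filter (fun i => decide (i ∈ prev_beams)) := by
  have hR : ((PySem.List.pyRange 0 n 1).filter (fun i => decide (i ∈ prev_beams))).Pairwise (· < ·) :=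
    (PySem.List.pairwise_lt_pyRange_one 0 n).filter _
  have hs : PySem.List.sorted
      ((PySem.Set.ofList prev_beams).filter (fun i => decide (0 ≤ i ∧ i < n)))
      (fun x => x) true
      = ((PySem.List.pyRange 0 n 1).filter (fun i => decide (i ∈ prev_beams))).reverse := by
    apply PySem.List.sorted_rev_eq_of_perm_of_pairwise_gt
    · refine List.Perm.trans (List.reverse_perm _) ?_
      apply (List.perm_ext_iff_of_nodup _ _).2
      · intro a
        simp [List.mem_filter, PySem.List.mem_pyRange_one, PySem.Set.mem_ofList]
        tauto
      · exact hR.imp ne_of_lt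
      · exact ((PySem.Set.nodup_ofList prev_beams).filter _)
    · exact (List.pairwise_reverse).2 hR
  rw [hs, List.reverse_reverse]

theorem pvAB (prev_beams : List Int) (curr_row : String) :
    compute_beams prev_beams curr_row = compute_beams_alt prev_beams curr_row := by
  unfold compute_beams compute_beams_alt
  have hA : (fun (st : PySem.Set Int × Int) (i : Int) =>
      let val := PySem.List.pyGetD curr_row.toList i ' '
      if i ∈ prev_beams then
        let st1 := if val = '.' then (PySem.Set.add st.1 i, st.2) else st
        if val = '^' then (PySem.Set.add (PySem.Set.add st1.1 (i - 1)) (i + 1), st1.2 + 1) else st1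
      else st)
      = (fun st i => if i ∈ prev_beams then pvCore curr_row st i else st) := by
    funext st i
    by_cases h : i ∈ prev_beams
    · simp only [if_pos h]
      exact pvCoreA curr_row st i
    · simp only [if_neg h]
  rw [hA,
    PySem.List.foldl_ite_eq_foldl_filter (fun i => i ∈ prev_beams) (pvCore curr_row) _ _,
    pvLoopAlt_eq_foldl, pvListEq]

-- ===== VERDICT =====
theorem compute_beams_spec : Claim_equal_compute_beams := by
  intro prev_beams curr_row _
  unfold Spec_compute_beams
  exact pvAB prev_beams curr_row
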